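-- pv_equiv track=rewrite | github.com/mode-io/skill-manager | skill_manager/application/mcp/adapters.py | _drift_detail
-- ===== SOURCE A (Python) =====
-- def _drift_detail(expected: object, actual: object) -> str:
--     if not isinstance(expected, dict) or not isinstance(actual, dict):
--         return "value mismatch"
--     missing = sorted(set(expected) - set(actual))
--     extra = sorted(set(actual) - set(expected))
--     changed = sorted(
--         key for key in set(expected) & set(actual) if expected[key] != actual[key]
--     )
--     parts: list[str] = []
--     if missing:
--         parts.append(f"missing={','.join(missing)}")
--     if extra:
--         parts.append(f"extra={','.join(extra)}")
--     if changed: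
--         parts.append(f"changed={','.join(changed)}")
--     return "; ".join(parts) or "value mismatch"
-- ===== SOURCE B (Python) =====
-- def _drift_detail(expected: object, actual: object) -> str:
--     if not isinstance(expected, dict) or not isinstance(actual, dict):
--         return "value mismatch"
--     e = sorted(expected.items(), key=lambda kv: kv[0])
--     a = sorted(actual.items(), key=lambda kv: kv[0])
--     missing, extra, changed = [], [], []
--     i = j = 0
--     while i < len(e) and j < len(a):
--         ke, ve = e[i]
--         ka, va = a[j]
--         if ke < ka:
--             missing.append(ke)
--             i += 1
--         elif ka < ke:
--             extra.append(ka)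
--             j += 1
--         else:
--             if ve != va:
--                 changed.append(ke)
--             i += 1
--             j += 1
--     while i < len(e):
--         missing.append(e[i][0])
--         i += 1
--     while j < len(a):
--         extra.append(a[j][0])
--         j += 1
--     parts = []
--     if missing:
--         parts.append("missing=" + ",".join(missing))
--     if extra:
--         parts.append("extra=" + ",".join(extra))
--     if changed:
--         parts.append("changed=" + ",".join(changed))
--     return "; ".join(parts) or "value mismatch"
-- ===== Notes on version B (the rewrite author's own statement) =====
-- stated objective: alternative
-- what changed: Replaces A's set-algebra (two set differences, an intersection filter, then three sorts of key sets) by sorting both item lists once and classifying keys with a two-pointer merge that emits the missing/extra/changed buckets already in sorted order, with no set objects and no per-bucket sort.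
import Mathlib
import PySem

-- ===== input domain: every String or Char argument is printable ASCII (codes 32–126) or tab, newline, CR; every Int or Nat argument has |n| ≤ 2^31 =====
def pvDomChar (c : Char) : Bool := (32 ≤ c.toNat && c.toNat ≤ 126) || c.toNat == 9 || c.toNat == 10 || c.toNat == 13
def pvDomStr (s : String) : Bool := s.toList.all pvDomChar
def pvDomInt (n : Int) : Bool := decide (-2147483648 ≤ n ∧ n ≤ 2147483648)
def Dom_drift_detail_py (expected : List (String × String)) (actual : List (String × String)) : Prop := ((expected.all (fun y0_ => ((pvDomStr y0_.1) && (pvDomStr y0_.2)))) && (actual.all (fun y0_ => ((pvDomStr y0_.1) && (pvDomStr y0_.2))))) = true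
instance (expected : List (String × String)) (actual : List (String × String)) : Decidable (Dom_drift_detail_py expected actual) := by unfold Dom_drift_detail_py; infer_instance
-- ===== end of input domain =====

-- B sorts both item lists once and classifies keys with a two-pointer merge emitting the
-- missing/extra/changed buckets already sorted, instead of A's set algebra plus three sorts;
-- alternative decomposition, same asymptotic cost.


-- ===== PORT A =====
-- the isinstance guard never fires in this typed port: both arguments are dicts by type
def drift_detail_py (expected : List (String × String)) (actual : List (String × String)) : String :=
  let eset := PySem.Set.ofList (expected.map Prod.fst)
  let aset := PySem.Set.ofList (actual.map Prod.fst)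
  let missing := PySem.List.sorted (PySem.Set.diff eset aset) (fun x => x) false
  let extra := PySem.List.sorted (PySem.Set.diff aset eset) (fun x => x) false
  let changed := PySem.List.sorted
    ((PySem.Set.inter eset aset).filter
      (fun k => PySem.Dict.get? ⟨expected⟩ k != PySem.Dict.get? ⟨actual⟩ k)) (fun x => x) false
  let parts : List String := []
  let parts := if missing.isEmpty then parts
               else parts ++ ["missing=" ++ PySem.Str.join "," missing]
  let parts := if extra.isEmpty then parts
               else parts ++ ["extra=" ++ PySem.Str.join "," extra]
  let parts := if changed.isEmpty then parts
               else parts ++ ["changed=" ++ PySem.Str.join "," changed]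
  let s := PySem.Str.join "; " parts
  if s = "" then "value mismatch" else s

-- ===== PORT B =====
-- Source B's two-pointer merge loop over the two key-sorted item lists, as the obvious structural
-- recursion on the two suffixes e[i:], a[j:]; the two trailing while loops are the base cases
def pvMerge : List (String × String) → List (String × String) →
    List String × List String × List String
  | [], ys => ([], ys.map Prod.fst, [])
  | x :: xs, [] => (x.1 :: xs.map Prod.fst, [], [])
  | x :: xs, y :: ys =>
    if x.1 < y.1 then
      let r := pvMerge xs (y :: ys)
      (x.1 :: r.1, r.2.1, r.2.2)
    else if y.1 < x.1 then
      let r := pvMerge (x :: xs) ys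
      (r.1, y.1 :: r.2.1, r.2.2)
    else
      let r := pvMerge xs ys
      if x.2 != y.2 then (r.1, r.2.1, x.1 :: r.2.2) else r
  termination_by xs ys => xs.length + ys.length
  decreasing_by all_goals simp <;> omega

def drift_detail_py_alt (expected : List (String × String)) (actual : List (String × String)) : String :=
  let e := PySem.List.sorted expected (fun kv => kv.1) false
  let a := PySem.List.sorted actual (fun kv => kv.1) false
  let tri := pvMerge e a
  let parts : List String := []
  let parts := if tri.1.isEmpty then parts
               else parts ++ ["missing=" ++ PySem.Str.join "," tri.1]
  let parts := if tri.2.1.isEmpty then parts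
               else parts ++ ["extra=" ++ PySem.Str.join "," tri.2.1]
  let parts := if tri.2.2.isEmpty then parts
               else parts ++ ["changed=" ++ PySem.Str.join "," tri.2.2]
  let s := PySem.Str.join "; " parts
  if s = "" then "value mismatch" else s

-- ===== PRECONDITION & SPEC =====
-- Pre_ excludes association lists with duplicate keys: they do not represent any Python dict,
-- which is the argument type A actually receives (a dict's keys are always distinct).
def Pre_drift_detail_py (expected : List (String × String)) (actual : List (String × String)) : Prop :=
  (expected.map Prod.fst).Nodup ∧ (actual.map Prod.fst).Nodup
instance (expected : List (String × String)) (actual : List (String × String)) : Decidable (Pre_drift_detail_py expected actual) := by unfold Pre_drift_detail_py; infer_instance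
def pvWitness_drift_detail_py : (List (String × String)) × (List (String × String)) :=
  ([("a", "1"), ("b", "2")], [("b", "3"), ("c", "4")])

def Spec_drift_detail_py (expected : List (String × String)) (actual : List (String × String)) (out : String) : Prop := out = drift_detail_py_alt expected actual
instance (expected : List (String × String)) (actual : List (String × String)) (out : String) : Decidable (Spec_drift_detail_py expected actual out) := by unfold Spec_drift_detail_py; infer_instance

-- ===== CLAIM (what is proved, stated in full; the proofs are below) =====
def Claim_equal_drift_detail_py : Prop := ∀ (expected : List (String × String)) (actual : List (String × String)), Dom_drift_detail_py expected actual → Pre_drift_detail_py expected actual → Spec_drift_detail_py expected actual (drift_detail_py expected actual)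

-- ===== LEMMAS AND PROOFS =====

-- on strictly key-sorted lists the merge's three buckets are the three key filters
theorem pvMerge_spec (xs ys : List (String × String)) :
    (xs.map Prod.fst).Pairwise (· < ·) → (ys.map Prod.fst).Pairwise (· < ·) →
    pvMerge xs ys =
      ((xs.map Prod.fst).filter (fun k => !((ys.map Prod.fst).contains k)),
       (ys.map Prod.fst).filter (fun k => !((xs.map Prod.fst).contains k)),
       (xs.map Prod.fst).filter (fun k => ((ys.map Prod.fst).contains k) &&
         (PySem.Dict.get? ⟨xs⟩ k != PySem.Dict.get? ⟨ys⟩ k))) := by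
  induction xs, ys using pvMerge.induct with
  | case1 ys => intro _ _; simp [pvMerge]
  | case2 x xs => intro _ _; simp [pvMerge]
  | case3 x xs y ys h ih =>
    obtain ⟨kx, vx⟩ := x; obtain ⟨ky, vy⟩ := y
    intro hx hy
    rw [List.map_cons, List.pairwise_cons] at hx
    obtain ⟨hxhd, hxtl⟩ := hx
    have hyhd := (List.pairwise_cons.mp (by rwa [List.map_cons] at hy)).1
    have heq := ih hxtl hy
    have hlt : kx < ky := h
    have hxys : kx ∉ List.map Prod.fst ys := fun hm => lt_asymm hlt (hyhd _ hm)
    have hstep : pvMerge ((kx, vx) :: xs) ((ky, vy) :: ys) =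
        (kx :: (pvMerge xs ((ky, vy) :: ys)).1, (pvMerge xs ((ky, vy) :: ys)).2.1,
          (pvMerge xs ((ky, vy) :: ys)).2.2) := by
      rw [pvMerge]; simp [h]
    rw [hstep, heq]
    refine Prod.ext ?_ (Prod.ext ?_ ?_)
    · simp only [List.map_cons]
      rw [List.filter_cons]
      have hhead : (!((ky :: List.map Prod.fst ys).contains kx)) = true := by
        simp [hlt.ne, hxys]
      rw [hhead]
      simp
    · simp only [List.map_cons]
      apply List.filter_congr
      intro k hk
      have h' : kx < k := by
        rcases List.mem_cons.mp hk with rfl | hk'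
        · exact hlt
        · exact lt_trans hlt (hyhd _ hk')
      simp [h'.ne']
    · simp only [List.map_cons]
      rw [List.filter_cons]
      have hhead : (((ky :: List.map Prod.fst ys).contains kx) &&
          (PySem.Dict.get? ⟨(kx, vx) :: xs⟩ kx != PySem.Dict.get? ⟨(ky, vy) :: ys⟩ kx)) = false := by
        simp [hlt.ne, hxys]
      rw [hhead]
      simp only [Bool.false_eq_true, if_false]
      apply List.filter_congr
      intro k hk
      have h' : kx < k := hxhd k hk
      simp [PySem.Dict.get?_mk_cons, h'.ne]
  | case4 x xs y ys h1 h ih =>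
    obtain ⟨kx, vx⟩ := x; obtain ⟨ky, vy⟩ := y
    intro hx hy
    rw [List.map_cons, List.pairwise_cons] at hy
    obtain ⟨hyhd, hytl⟩ := hy
    have hxhd := (List.pairwise_cons.mp (by rwa [List.map_cons] at hx)).1
    have heq := ih hx hytl
    have hlt : ky < kx := h
    have hkyxs : ky ∉ List.map Prod.fst xs := fun hm => lt_asymm hlt (hxhd _ hm)
    have hstep : pvMerge ((kx, vx) :: xs) ((ky, vy) :: ys) =
        ((pvMerge ((kx, vx) :: xs) ys).1, ky :: (pvMerge ((kx, vx) :: xs) ys).2.1,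
          (pvMerge ((kx, vx) :: xs) ys).2.2) := by
      rw [pvMerge]; simp [h1, h]
    rw [hstep, heq]
    refine Prod.ext ?_ (Prod.ext ?_ ?_)
    · simp only [List.map_cons]
      apply List.filter_congr
      intro k hk
      have h' : ky < k := by
        rcases List.mem_cons.mp hk with rfl | hk'
        · exact hlt
        · exact lt_trans hlt (hxhd _ hk')
      simp [h'.ne']
    · simp only [List.map_cons]
      rw [List.filter_cons]
      have hhead : (!((kx :: List.map Prod.fst xs).contains ky)) = true := by
        simp [hlt.ne, hkyxs]
      rw [hhead]
      simp
    · simp only [List.map_cons]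
      apply List.filter_congr
      intro k hk
      have h' : ky < k := by
        rcases List.mem_cons.mp hk with rfl | hk'
        · exact hlt
        · exact lt_trans hlt (hxhd _ hk')
      have hbe : (k == ky) = false := beq_eq_false_iff_ne.mpr h'.ne'
      simp [PySem.Dict.get?_mk_cons, hbe, h'.ne, h'.ne']
  | case5 x xs y ys h1 h2 h3 ih =>
    obtain ⟨kx, vx⟩ := x; obtain ⟨ky, vy⟩ := y
    intro hx hy
    have hk : ky = kx := le_antisymm (not_lt.mp h1) (not_lt.mp h2)
    subst hk
    rw [List.map_cons, List.pairwise_cons] at hx hy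
    obtain ⟨hxhd, hxtl⟩ := hx
    obtain ⟨hyhd, hytl⟩ := hy
    have heq := ih hxtl hytl
    have hstep : pvMerge ((ky, vx) :: xs) ((ky, vy) :: ys) =
        ((pvMerge xs ys).1, (pvMerge xs ys).2.1, ky :: (pvMerge xs ys).2.2) := by
      have hvv : vx ≠ vy := by simpa using h3
      rw [pvMerge]; simp [hvv]
    rw [hstep, heq]
    refine Prod.ext ?_ (Prod.ext ?_ ?_)
    · simp only [List.map_cons]
      rw [List.filter_cons]
      have hhead : (!((ky :: List.map Prod.fst ys).contains ky)) = false := by simp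
      rw [hhead]
      simp only [Bool.false_eq_true, if_false]
      apply List.filter_congr
      intro k hk
      have h' : ky < k := hxhd k hk
      simp [h'.ne']
    · simp only [List.map_cons]
      rw [List.filter_cons]
      have hhead : (!((ky :: List.map Prod.fst xs).contains ky)) = false := by simp
      rw [hhead]
      simp only [Bool.false_eq_true, if_false]
      apply List.filter_congr
      intro k hk
      have h' : ky < k := hyhd k hk
      simp [h'.ne']
    · simp only [List.map_cons]
      rw [List.filter_cons]
      have hhead : (((ky :: List.map Prod.fst ys).contains ky) &&
          (PySem.Dict.get? ⟨(ky, vx) :: xs⟩ ky != PySem.Dict.get? ⟨(ky, vy) :: ys⟩ ky)) = true := by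
        have hvv : vx ≠ vy := by simpa using h3
        simp [PySem.Dict.get?_mk_cons, hvv]
      rw [hhead]
      simp only [if_true]
      congr 1
      apply List.filter_congr
      intro k hk
      have h' : ky < k := hxhd k hk
      have hbe : (k == ky) = false := beq_eq_false_iff_ne.mpr h'.ne'
      simp [PySem.Dict.get?_mk_cons, hbe, h'.ne, h'.ne']
  | case6 x xs y ys h1 h2 h3 ih =>
    obtain ⟨kx, vx⟩ := x; obtain ⟨ky, vy⟩ := y
    intro hx hy
    have hk : ky = kx := le_antisymm (not_lt.mp h1) (not_lt.mp h2)
    subst hk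
    rw [List.map_cons, List.pairwise_cons] at hx hy
    obtain ⟨hxhd, hxtl⟩ := hx
    obtain ⟨hyhd, hytl⟩ := hy
    have heq := ih hxtl hytl
    have hstep : pvMerge ((ky, vx) :: xs) ((ky, vy) :: ys) = pvMerge xs ys := by
      rw [pvMerge]; simp [h3]
    rw [hstep, heq]
    refine Prod.ext ?_ (Prod.ext ?_ ?_)
    · simp only [List.map_cons]
      rw [List.filter_cons]
      have hhead : (!((ky :: List.map Prod.fst ys).contains ky)) = false := by simp
      rw [hhead]
      simp only [Bool.false_eq_true, if_false]
      apply List.filter_congr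
      intro k hk
      have h' : ky < k := hxhd k hk
      simp [h'.ne']
    · simp only [List.map_cons]
      rw [List.filter_cons]
      have hhead : (!((ky :: List.map Prod.fst xs).contains ky)) = false := by simp
      rw [hhead]
      simp only [Bool.false_eq_true, if_false]
      apply List.filter_congr
      intro k hk
      have h' : ky < k := hyhd k hk
      simp [h'.ne']
    · simp only [List.map_cons]
      rw [List.filter_cons]
      have hhead : (((ky :: List.map Prod.fst ys).contains ky) &&
          (PySem.Dict.get? ⟨(ky, vx) :: xs⟩ ky != PySem.Dict.get? ⟨(ky, vy) :: ys⟩ ky)) = false := by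
        simp [PySem.Dict.get?_mk_cons]
        simpa using h3
      rw [hhead]
      simp only [Bool.false_eq_true, if_false]
      apply List.filter_congr
      intro k hk
      have h' : ky < k := hxhd k hk
      have hbe : (k == ky) = false := beq_eq_false_iff_ne.mpr h'.ne'
      simp [PySem.Dict.get?_mk_cons, hbe, h'.ne, h'.ne']

-- get? ignores the order of a duplicate-free association list
theorem pvGet?_perm (l l' : List (String × String)) (h : l.Perm l')
    (hnd : (l.map Prod.fst).Nodup) (k : String) :
    PySem.Dict.get? ⟨l⟩ k = PySem.Dict.get? ⟨l'⟩ k := by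
  have hnd' : (l'.map Prod.fst).Nodup := ((h.map Prod.fst).nodup_iff).mp hnd
  cases hv : PySem.Dict.get? (⟨l⟩ : PySem.Dict String String) k with
  | none =>
    symm
    rw [PySem.Dict.get?_eq_none_iff_not_mem_keys] at hv ⊢
    simp only [PySem.Dict.keys_mk] at hv ⊢
    exact fun hm => hv ((h.map Prod.fst).mem_iff.mpr hm)
  | some v =>
    have hm : (k, v) ∈ l := PySem.Dict.mem_items_of_get?_eq_some _ hv
    exact (PySem.Dict.get?_of_mem_items _ (h.mem_iff.mp hm)
      (by simpa [PySem.Dict.keys_mk] using hnd')).symm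

-- contains ignores order
theorem pvContains_perm {l l' : List String} (h : l.Perm l') (k : String) :
    l.contains k = l'.contains k := by
  by_cases hk : k ∈ l
  · simp [hk, h.mem_iff.mp hk]
  · have hk' : k ∉ l' := fun hm => hk (h.mem_iff.mpr hm)
    simp [hk, hk']

-- ===== VERDICT (by name: the statement is the Claim_ definition above) =====
theorem drift_detail_py_spec : Claim_equal_drift_detail_py := by
  intro expected actual _ hpre
  obtain ⟨hne, hna⟩ := hpre
  unfold Spec_drift_detail_py drift_detail_py drift_detail_py_alt
  have hEperm : (PySem.List.sorted expected (fun kv => kv.1) false).Perm expected :=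
    PySem.List.sorted_perm _ _ _
  have hAperm : (PySem.List.sorted actual (fun kv => kv.1) false).Perm actual :=
    PySem.List.sorted_perm _ _ _
  have hkE := hEperm.map Prod.fst
  have hkA := hAperm.map Prod.fst
  have hndE : ((PySem.List.sorted expected (fun kv => kv.1) false).map Prod.fst).Nodup :=
    hkE.nodup_iff.mpr hne
  have hndA : ((PySem.List.sorted actual (fun kv => kv.1) false).map Prod.fst).Nodup :=
    hkA.nodup_iff.mpr hna
  have hleE : ((PySem.List.sorted expected (fun kv => kv.1) false).map Prod.fst).Pairwise (· ≤ ·) :=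
    (PySem.List.sorted_pairwise expected (fun kv => kv.1)).map Prod.fst (fun _ _ hab => hab)
  have hleA : ((PySem.List.sorted actual (fun kv => kv.1) false).map Prod.fst).Pairwise (· ≤ ·) :=
    (PySem.List.sorted_pairwise actual (fun kv => kv.1)).map Prod.fst (fun _ _ hab => hab)
  have hltE : ((PySem.List.sorted expected (fun kv => kv.1) false).map Prod.fst).Pairwise (· < ·) :=
    (hleE.and hndE).imp (fun hab => lt_of_le_of_ne hab.1 hab.2)
  have hltA : ((PySem.List.sorted actual (fun kv => kv.1) false).map Prod.fst).Pairwise (· < ·) :=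
    (hleA.and hndA).imp (fun hab => lt_of_le_of_ne hab.1 hab.2)
  have hmerge := pvMerge_spec _ _ hltE hltA
  have hsetE : PySem.Set.ofList (expected.map Prod.fst) = expected.map Prod.fst :=
    PySem.Set.ofList_eq_self_of_nodup _ hne
  have hsetA : PySem.Set.ofList (actual.map Prod.fst) = actual.map Prod.fst :=
    PySem.Set.ofList_eq_self_of_nodup _ hna
  have hmiss : PySem.List.sorted (PySem.Set.diff (PySem.Set.ofList (expected.map Prod.fst))
        (PySem.Set.ofList (actual.map Prod.fst))) (fun x => x) false =
      ((PySem.List.sorted expected (fun kv => kv.1) false).map Prod.fst).filter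
        (fun k => !(((PySem.List.sorted actual (fun kv => kv.1) false).map Prod.fst).contains k)) := by
    apply PySem.List.sorted_eq_of_perm_of_pairwise_lt
    · rw [hsetE, hsetA]
      unfold PySem.Set.diff
      have hfun : (fun k => !(((PySem.List.sorted actual (fun kv => kv.1) false).map Prod.fst).contains k)) =
          (fun k => !((actual.map Prod.fst).contains k)) :=
        funext fun k => by rw [pvContains_perm hkA k]
      rw [hfun]
      exact hkE.filter _
    · exact List.Pairwise.sublist List.filter_sublist hltE
  have hextra : PySem.List.sorted (PySem.Set.diff (PySem.Set.ofList (actual.map Prod.fst))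
        (PySem.Set.ofList (expected.map Prod.fst))) (fun x => x) false =
      ((PySem.List.sorted actual (fun kv => kv.1) false).map Prod.fst).filter
        (fun k => !(((PySem.List.sorted expected (fun kv => kv.1) false).map Prod.fst).contains k)) := by
    apply PySem.List.sorted_eq_of_perm_of_pairwise_lt
    · rw [hsetE, hsetA]
      unfold PySem.Set.diff
      have hfun : (fun k => !(((PySem.List.sorted expected (fun kv => kv.1) false).map Prod.fst).contains k)) =
          (fun k => !((expected.map Prod.fst).contains k)) :=
        funext fun k => by rw [pvContains_perm hkE k]
      rw [hfun]
      exact hkA.filter _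
    · exact List.Pairwise.sublist List.filter_sublist hltA
  have hchg : PySem.List.sorted ((PySem.Set.inter (PySem.Set.ofList (expected.map Prod.fst))
        (PySem.Set.ofList (actual.map Prod.fst))).filter
          (fun k => PySem.Dict.get? ⟨expected⟩ k != PySem.Dict.get? ⟨actual⟩ k)) (fun x => x) false =
      ((PySem.List.sorted expected (fun kv => kv.1) false).map Prod.fst).filter
        (fun k => (((PySem.List.sorted actual (fun kv => kv.1) false).map Prod.fst).contains k) &&
          (PySem.Dict.get? ⟨PySem.List.sorted expected (fun kv => kv.1) false⟩ k !=
            PySem.Dict.get? ⟨PySem.List.sorted actual (fun kv => kv.1) false⟩ k)) := by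
    apply PySem.List.sorted_eq_of_perm_of_pairwise_lt
    · rw [hsetE, hsetA]
      unfold PySem.Set.inter
      rw [List.filter_filter]
      have hfun : (fun k => (((PySem.List.sorted actual (fun kv => kv.1) false).map Prod.fst).contains k) &&
            (PySem.Dict.get? ⟨PySem.List.sorted expected (fun kv => kv.1) false⟩ k !=
              PySem.Dict.get? ⟨PySem.List.sorted actual (fun kv => kv.1) false⟩ k)) =
          (fun k => (PySem.Dict.get? (⟨expected⟩ : PySem.Dict String String) k !=
              PySem.Dict.get? (⟨actual⟩ : PySem.Dict String String) k) &&
            ((actual.map Prod.fst).contains k)) :=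
        funext fun k => by
          rw [pvContains_perm hkA k, pvGet?_perm _ _ hEperm hndE k, pvGet?_perm _ _ hAperm hndA k,
            Bool.and_comm]
      rw [hfun]
      exact hkE.filter _
    · exact List.Pairwise.sublist List.filter_sublist hltE
  simp only [hmerge, hmiss, hextra, hchg]
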